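-- pv_equiv track=rewrite | github.com/Fikiri-Solutions/fikiri-solutions | core/ai_chat_api.py | _get_suggested_actions
-- ===== SOURCE A (Python) =====
-- from typing import Dict, Any, List, Optional
--
-- def _get_suggested_actions(message: str) -> List[str]:
--     """Get suggested actions based on user message"""
--     message_lower = message.lower()
--
--     if any(word in message_lower for word in ['analyze', 'leads', 'priority']):
--         return ['View CRM Dashboard', 'Check Lead Scores', 'Review Recent Leads']
--     elif any(word in message_lower for word in ['write', 'email', 'response']):
--         return ['Go to AI Assistant', 'Select a Lead', 'Generate Reply']
--     elif any(word in message_lower for word in ['automation', 'workflow']):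
--         return ['View Automations Page', 'Browse Presets', 'Create Custom Rule']
--     else:
--         return ['Check Dashboard', 'View CRM', 'Explore Features']
-- ===== SOURCE B (Python) =====
-- KEYWORD_CATEGORY = {
--     'analyze': 0, 'leads': 0, 'priority': 0,
--     'write': 1, 'email': 1, 'response': 1,
--     'automation': 2, 'workflow': 2,
-- }
--
-- ACTIONS = [
--     ['View CRM Dashboard', 'Check Lead Scores', 'Review Recent Leads'],
--     ['Go to AI Assistant', 'Select a Lead', 'Generate Reply'],
--     ['View Automations Page', 'Browse Presets', 'Create Custom Rule'],
--     ['Check Dashboard', 'View CRM', 'Explore Features'],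
-- ]
--
-- def _get_suggested_actions(message: str):
--     """Get suggested actions based on user message"""
--     message_lower = message.lower()
--     cat = min((c for k, c in KEYWORD_CATEGORY.items() if k in message_lower),
--               default=len(ACTIONS) - 1)
--     return list(ACTIONS[cat])
-- ===== Notes on version B (the rewrite author's own statement) =====
-- stated objective: alternative
-- what changed: Replaced the first-match if-elif chain by a keyword-to-category-index map: B takes the minimum category index among all matched keywords (default = last index) and indexes a list-of-action-lists, with no early return or per-group branching.
import Mathlib
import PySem

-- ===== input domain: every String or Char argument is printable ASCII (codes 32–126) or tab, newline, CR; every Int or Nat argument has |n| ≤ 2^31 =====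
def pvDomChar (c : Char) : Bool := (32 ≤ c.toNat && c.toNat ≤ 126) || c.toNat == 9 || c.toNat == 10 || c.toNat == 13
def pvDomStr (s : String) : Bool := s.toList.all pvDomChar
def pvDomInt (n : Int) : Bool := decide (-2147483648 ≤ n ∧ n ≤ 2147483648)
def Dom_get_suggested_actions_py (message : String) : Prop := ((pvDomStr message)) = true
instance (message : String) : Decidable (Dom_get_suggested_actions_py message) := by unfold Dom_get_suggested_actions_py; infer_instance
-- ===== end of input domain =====

-- B replaces the if-elif chain by a keyword→category map whose minimum matched index selects
-- the action list from a table (alternative decomposition, same cost).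

-- ===== PORT A =====
def get_suggested_actions_py (message : String) : List String :=
  let message_lower := PySem.Str.lower message
  if ["analyze", "leads", "priority"].any (fun word => PySem.Str.isIn word message_lower) then
    ["View CRM Dashboard", "Check Lead Scores", "Review Recent Leads"]
  else if ["write", "email", "response"].any (fun word => PySem.Str.isIn word message_lower) then
    ["Go to AI Assistant", "Select a Lead", "Generate Reply"]
  else if ["automation", "workflow"].any (fun word => PySem.Str.isIn word message_lower) then
    ["View Automations Page", "Browse Presets", "Create Custom Rule"]
  else
    ["Check Dashboard", "View CRM", "Explore Features"]

-- ===== PORT B =====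
-- KEYWORD_CATEGORY dict of Source B (association list in insertion order)
def pvKeywordCategory : List (String × Int) :=
  [("analyze", 0), ("leads", 0), ("priority", 0),
   ("write", 1), ("email", 1), ("response", 1),
   ("automation", 2), ("workflow", 2)]

-- ACTIONS table of Source B
def pvActions : List (List String) :=
  [["View CRM Dashboard", "Check Lead Scores", "Review Recent Leads"],
   ["Go to AI Assistant", "Select a Lead", "Generate Reply"],
   ["View Automations Page", "Browse Presets", "Create Custom Rule"],
   ["Check Dashboard", "View CRM", "Explore Features"]]

def get_suggested_actions_py_alt (message : String) : List String :=
  let message_lower := PySem.Str.lower message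
  -- min(... generator of matched categories ..., default=len(ACTIONS)-1)
  let matched := pvKeywordCategory.filterMap
    (fun kc => if PySem.Str.isIn kc.1 message_lower then some kc.2 else none)
  let cat := (PySem.List.min? matched (fun x => x)).getD ((pvActions.length : Int) - 1)
  -- ACTIONS[cat]: cat is always in range, [] is unreachable
  (PySem.List.pyGet? pvActions cat).getD []

-- ===== PRECONDITION & SPEC =====
def Spec_get_suggested_actions_py (message : String) (out : List String) : Prop := out = get_suggested_actions_py_alt message
instance (message : String) (out : List String) : Decidable (Spec_get_suggested_actions_py message out) := by unfold Spec_get_suggested_actions_py; infer_instance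

-- ===== CLAIM (what is proved, stated in full; the proofs are below) =====
def Claim_equal_get_suggested_actions_py : Prop := ∀ (message : String), Dom_get_suggested_actions_py message → Spec_get_suggested_actions_py message (get_suggested_actions_py message)

-- ===== LEMMAS AND PROOFS =====

-- ===== VERDICT (by name: the statement is the Claim_ definition above) =====
set_option maxHeartbeats 2000000 in
theorem get_suggested_actions_py_spec : Claim_equal_get_suggested_actions_py := by
  intro message _
  unfold Spec_get_suggested_actions_py get_suggested_actions_py get_suggested_actions_py_alt
  simp only [pvKeywordCategory, pvActions]
  generalize PySem.Str.lower message = ml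
  by_cases h1 : PySem.Chars.isIn ['a','n','a','l','y','z','e'] ml.toList = true <;>
  by_cases h2 : PySem.Chars.isIn ['l','e','a','d','s'] ml.toList = true <;>
  by_cases h3 : PySem.Chars.isIn ['p','r','i','o','r','i','t','y'] ml.toList = true <;>
  by_cases h4 : PySem.Chars.isIn ['w','r','i','t','e'] ml.toList = true <;>
  by_cases h5 : PySem.Chars.isIn ['e','m','a','i','l'] ml.toList = true <;>
  by_cases h6 : PySem.Chars.isIn ['r','e','s','p','o','n','s','e'] ml.toList = true <;>
  by_cases h7 : PySem.Chars.isIn ['a','u','t','o','m','a','t','i','o','n'] ml.toList = true <;>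
  by_cases h8 : PySem.Chars.isIn ['w','o','r','k','f','l','o','w'] ml.toList = true <;>
  simp [h1, h2, h3, h4, h5, h6, h7, h8, PySem.List.min?, PySem.List.pyGet?, PySem.List.pyIdx?]
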